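-- pv_equiv track=rewrite | github.com/eliemichel/WebGPU-Cpp | generate.py | to_constant_case
-- ===== SOURCE A (Python) =====
-- def to_constant_case(caml_case):
--     naive = ''.join(['_'+c if c.isupper() or c.isnumeric() else c for c in caml_case]).lstrip('_').upper()
--     # We then regroup isolated characters together (because they correspond to acronyms):
--     current_acronym = None
--     tokens = []
--     for tok in naive.split("_"):
--         if len(tok) == 1:
--             if current_acronym is None:
--                 current_acronym = ""
--             current_acronym += tok
--         else:
--             if current_acronym is not None:
--                 tokens.append(current_acronym)
--             tokens.append(tok)
--             current_acronym = None
--     if current_acronym is not None: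
--         tokens.append(current_acronym)
--     return "_".join(tokens)
-- ===== SOURCE B (Python) =====
-- def _close(tokens, acr, seg):
--     # finish segment `seg`: length-1 segments accumulate into the acronym buffer,
--     # longer (or empty) segments flush the buffer and stand alone
--     if len(seg) == 1:
--         return tokens, ('' if acr is None else acr) + seg
--     if acr is not None:
--         tokens.append(acr)
--     tokens.append(seg)
--     return tokens, None
--
--
-- def to_constant_case(caml_case):
--     # single linear scan: no marker string, no lstrip, no split
--     i, n = 0, len(caml_case)
--     while i < n and caml_case[i] == '_':   # leading underscores vanish (A's lstrip)
--         i += 1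
--     if i == n:
--         return ''
--     tokens, acr = [], None
--     cur = caml_case[i]                     # first segment starts at first non-'_' char
--     for c in caml_case[i + 1:]:
--         if c == '_':
--             tokens, acr = _close(tokens, acr, cur)
--             cur = ''
--         elif c.isupper() or c.isnumeric():
--             tokens, acr = _close(tokens, acr, cur)
--             cur = c
--         else:
--             cur += c
--     tokens, acr = _close(tokens, acr, cur)
--     if acr is not None:
--         tokens.append(acr)
--     return '_'.join(tokens).upper()
-- ===== Notes on version B (the rewrite author's own statement) =====
-- stated objective: alternative
-- what changed: B replaces A's pipeline (build a '_'-marked copy of the string, lstrip, upper, split on '_', then a regrouping loop over the tokens) by a single direct scan over the characters that skips leading underscores, detects segment boundaries in place and merges length-1 segments into acronym tokens on the fly.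
import Mathlib
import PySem

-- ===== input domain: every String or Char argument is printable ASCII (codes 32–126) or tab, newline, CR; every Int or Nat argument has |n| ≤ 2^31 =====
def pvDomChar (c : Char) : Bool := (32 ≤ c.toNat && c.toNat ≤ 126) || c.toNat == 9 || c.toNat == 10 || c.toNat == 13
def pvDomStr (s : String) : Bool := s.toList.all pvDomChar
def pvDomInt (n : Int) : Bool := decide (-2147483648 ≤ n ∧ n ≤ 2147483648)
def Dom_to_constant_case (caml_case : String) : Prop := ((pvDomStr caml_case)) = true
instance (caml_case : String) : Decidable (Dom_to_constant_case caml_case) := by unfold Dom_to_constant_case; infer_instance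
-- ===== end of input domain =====

-- B replaces A's marker-string + lstrip + upper + split + regroup pipeline by one direct
-- scan over the characters that builds the token list as it goes (objective: alternative).

-- ===== PORT A =====
-- literal port of A: build the marked string, lstrip('_') (= drop leading '_' chars, exact),
-- upper, split on '_', then the regrouping loop.  isnumeric = isdigit on the ASCII domain.
def to_constant_case (caml_case : String) : String :=
  let naive : List Char :=
    PySem.Chars.upper
      (((caml_case.toList.map (fun c =>
            if PySem.Chars.isupper c || PySem.Chars.isdigit c then ['_', c] else [c])).flatten).dropWhile
        (fun c => c == '_'))
  let st :=
    (PySem.Chars.splitOn naive ['_']).foldl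
      (fun (st : List (List Char) × Option (List Char)) (tok : List Char) =>
        if tok.length == 1 then
          (st.1, some ((st.2.getD []) ++ tok))
        else
          match st.2 with
          | some a => (st.1 ++ [a] ++ [tok], none)
          | none   => (st.1 ++ [tok], none))
      ([], none)
  let tokens := match st.2 with | some a => st.1 ++ [a] | none => st.1
  String.ofList (PySem.Chars.join ['_'] tokens)

-- ===== PORT B =====
-- port of Source B: _close
def pvClose (tokens : List (List Char)) (acr : Option (List Char)) (seg : List Char) :
    List (List Char) × Option (List Char) :=
  if seg.length == 1 then (tokens, some ((acr.getD []) ++ seg))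
  else
    match acr with
    | some a => (tokens ++ [a] ++ [seg], none)
    | none   => (tokens ++ [seg], none)

-- the body of Source B's for-loop; state = ((tokens, acr), cur)
def pvStep (st : (List (List Char) × Option (List Char)) × List Char) (c : Char) :
    (List (List Char) × Option (List Char)) × List Char :=
  if c == '_' then (pvClose st.1.1 st.1.2 st.2, [])
  else if PySem.Chars.isupper c || PySem.Chars.isdigit c then (pvClose st.1.1 st.1.2 st.2, [c])
  else (st.1, st.2 ++ [c])

def to_constant_case_alt (caml_case : String) : String :=
  -- the initial while-loop skips the leading '_' characters
  match caml_case.toList.dropWhile (fun c => c == '_') with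
  | [] => ""
  | c0 :: rest =>
    let st := rest.foldl pvStep (([], none), [c0])
    let fin := pvClose st.1.1 st.1.2 st.2
    let tokens := match fin.2 with | some a => fin.1 ++ [a] | none => fin.1
    String.ofList (PySem.Chars.upper (PySem.Chars.join ['_'] tokens))

-- ===== PRECONDITION & SPEC =====
def Spec_to_constant_case (caml_case : String) (out : String) : Prop := out = to_constant_case_alt caml_case
instance (caml_case : String) (out : String) : Decidable (Spec_to_constant_case caml_case out) := by unfold Spec_to_constant_case; infer_instance

-- ===== CLAIM (what is proved, stated in full; the proofs are below) =====
def Claim_equal_to_constant_case : Prop := ∀ (caml_case : String), Dom_to_constant_case caml_case → Spec_to_constant_case caml_case (to_constant_case caml_case)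

-- ===== LEMMAS AND PROOFS =====

-- proof-side abbreviations
def pvBnd (c : Char) : Bool := PySem.Chars.isupper c || PySem.Chars.isdigit c

def pvMarked (cs : List Char) : List Char :=
  (cs.map (fun c => if PySem.Chars.isupper c || PySem.Chars.isdigit c then ['_', c] else [c])).flatten

-- str.split('_') as a structural recursion
def pvSplit : List Char → List (List Char)
  | [] => [[]]
  | c :: cs => if c == '_' then [] :: pvSplit cs else (pvSplit cs).modifyHead (c :: ·)

-- the segment list B produces from an open segment `cur` and remaining chars
def pvSegs : List Char → List Char → List (List Char)
  | cur, [] => [cur]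
  | cur, c :: cs =>
    if c == '_' then cur :: pvSegs [] cs
    else if pvBnd c then cur :: pvSegs [c] cs
    else pvSegs (cur ++ [c]) cs

def pvGrp (st : List (List Char) × Option (List Char)) (tok : List Char) :
    List (List Char) × Option (List Char) := pvClose st.1 st.2 tok

def pvFlush (st : List (List Char) × Option (List Char)) : List (List Char) :=
  match st.2 with | some a => st.1 ++ [a] | none => st.1

lemma pvMarked_cons (c : Char) (cs : List Char) :
    pvMarked (c :: cs) = (if pvBnd c then ['_', c] else [c]) ++ pvMarked cs := rfl

lemma pvBnd_underscore : pvBnd '_' = false := by decide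

lemma pvSplit_ne_nil (cs : List Char) : pvSplit cs ≠ [] := by
  induction cs with
  | nil => simp [pvSplit]
  | cons c cs ih =>
    simp only [pvSplit]
    split
    · simp
    · cases h : pvSplit cs with
      | nil => exact absurd h ih
      | cons a l => simp [List.modifyHead]

lemma pvSplitOn_go (fuel : Nat) :
    ∀ (l cur : List Char) (acc : List (List Char)), l.length < fuel →
      PySem.Chars.splitOn.go ['_'] fuel l cur acc
        = acc.reverse ++ (pvSplit l).modifyHead (cur.reverse ++ ·) := by
  induction fuel with
  | zero => intro l cur acc h; omega
  | succ fuel ih =>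
    intro l cur acc h
    cases l with
    | nil => simp [PySem.Chars.splitOn.go, pvSplit]
    | cons c rest =>
      have hlen : rest.length < fuel := by
        simp only [List.length_cons] at h; omega
      simp only [PySem.Chars.splitOn.go]
      by_cases hc : c = '_'
      · subst hc
        have hpre : List.isPrefixOf ['_'] ('_' :: rest) = true := by
          simp [List.isPrefixOf]
        rw [if_pos hpre]
        have hd : List.drop (['_'] : List Char).length ('_' :: rest) = rest := rfl
        rw [hd, ih rest [] (cur.reverse :: acc) hlen]
        have hs : pvSplit ('_' :: rest) = [] :: pvSplit rest := by simp [pvSplit]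
        rw [hs]
        cases hrest : pvSplit rest with
        | nil => exact absurd hrest (pvSplit_ne_nil rest)
        | cons a l => simp [List.modifyHead]
      · have hpre : List.isPrefixOf ['_'] (c :: rest) = false := by
          simp [List.isPrefixOf]
          exact fun h' => absurd h'.symm hc
        rw [if_neg (by simp [hpre])]
        rw [ih rest (c :: cur) acc hlen]
        have hs : pvSplit (c :: rest) = (pvSplit rest).modifyHead (c :: ·) := by
          simp [pvSplit, hc]
        rw [hs]
        cases hrest : pvSplit rest with
        | nil => exact absurd hrest (pvSplit_ne_nil rest)
        | cons a l => simp [List.modifyHead]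

lemma pvSplitOn_eq (cs : List Char) : PySem.Chars.splitOn cs ['_'] = pvSplit cs := by
  unfold PySem.Chars.splitOn
  rw [pvSplitOn_go (cs.length + 1) cs [] [] (Nat.lt_succ_self _)]
  cases h : pvSplit cs with
  | nil => exact absurd h (pvSplit_ne_nil cs)
  | cons a l => simp [List.modifyHead]

lemma pvUpperChar_underscore (c : Char) :
    (PySem.Chars.upperChar c == '_') = (c == '_') := by
  unfold PySem.Chars.upperChar PySem.Chars.islower
  split
  · next h =>
    simp only [Bool.and_eq_true, decide_eq_true_eq] at h
    have h1 : 97 ≤ c.toNat := h.1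
    have h2 : c.toNat ≤ 122 := h.2
    have hval : (c.toNat - 32) < 55296 := by omega
    have htn : (Char.ofNat (c.toNat - 32)).toNat = c.toNat - 32 := by
      unfold Char.ofNat
      rw [dif_pos (Or.inl hval)]
      rfl
    have h95 : ('_' : Char).toNat = 95 := by decide
    have hne : (Char.ofNat (c.toNat - 32) == '_') = false := by
      rw [beq_eq_false_iff_ne]
      intro he
      have h' := congrArg Char.toNat he
      rw [htn, h95] at h'
      omega
    have hne2 : (c == '_') = false := by
      rw [beq_eq_false_iff_ne]
      intro he
      rw [he, h95] at h1
      omega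
    rw [hne, hne2]
  · rfl

lemma pvSplit_upper (cs : List Char) :
    pvSplit (cs.map PySem.Chars.upperChar)
      = (pvSplit cs).map (List.map PySem.Chars.upperChar) := by
  induction cs with
  | nil => simp [pvSplit]
  | cons c cs ih =>
    simp only [List.map_cons, pvSplit, pvUpperChar_underscore]
    split
    · simp [ih]
    · rw [ih]
      cases h : pvSplit cs with
      | nil => exact absurd h (pvSplit_ne_nil cs)
      | cons a l => simp [List.modifyHead]

lemma pvDropWhile_marked (cs : List Char) :
    (pvMarked cs).dropWhile (fun c => c == '_')
      = (match cs.dropWhile (fun c => c == '_') with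
         | [] => ([] : List Char)
         | c :: rest => c :: pvMarked rest) := by
  induction cs with
  | nil => simp [pvMarked]
  | cons c cs ih =>
    rw [pvMarked_cons]
    by_cases hc : c = '_'
    · subst hc
      rw [if_neg (by simp [pvBnd_underscore])]
      simp only [List.cons_append, List.nil_append, List.dropWhile_cons]
      simp [ih]
    · by_cases hb : pvBnd c = true
      · rw [if_pos hb]
        simp only [List.cons_append, List.nil_append, List.dropWhile_cons]
        simp [hc]
      · rw [if_neg hb]
        simp only [List.cons_append, List.nil_append, List.dropWhile_cons]
        simp [hc]

lemma pvSplit_noSep_append (cur t : List Char) (h : '_' ∉ cur) :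
    pvSplit (cur ++ t) = (pvSplit t).modifyHead (cur ++ ·) := by
  induction cur with
  | nil =>
    simp only [List.nil_append]
    cases ht : pvSplit t with
    | nil => exact absurd ht (pvSplit_ne_nil t)
    | cons a l => simp [List.modifyHead]
  | cons c cur ih =>
    have hc : c ≠ '_' := fun he => h (he ▸ List.mem_cons_self ..)
    have hcur : '_' ∉ cur := fun hm => h (List.mem_cons_of_mem _ hm)
    simp only [List.cons_append, pvSplit]
    rw [if_neg (by simp [hc]), ih hcur]
    cases ht : pvSplit t with
    | nil => exact absurd ht (pvSplit_ne_nil t)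
    | cons a l => simp [List.modifyHead]

lemma pvSplit_marked (cs : List Char) : ∀ (cur : List Char), '_' ∉ cur →
    pvSplit (cur ++ pvMarked cs) = pvSegs cur cs := by
  induction cs with
  | nil =>
    intro cur h
    have : pvMarked [] = [] := rfl
    rw [this, List.append_nil, show (pvSegs cur [] = [cur]) from rfl]
    rw [show (cur : List Char) = cur ++ [] by simp, pvSplit_noSep_append cur [] h]
    simp [pvSplit, List.modifyHead]
  | cons c cs ih =>
    intro cur h
    rw [pvMarked_cons]
    by_cases hc : c = '_'
    · subst hc
      rw [if_neg (by simp [pvBnd_underscore])]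
      rw [show ((['_'] ++ pvMarked cs : List Char)) = '_' :: pvMarked cs from rfl]
      rw [pvSplit_noSep_append cur _ h]
      have h1 : pvSplit ('_' :: pvMarked cs) = [] :: pvSplit (pvMarked cs) := by
        simp [pvSplit]
      have h2 : pvSplit (pvMarked cs) = pvSegs [] cs := by
        simpa using ih [] (by simp)
      rw [h1, h2]
      have h3 : pvSegs cur ('_' :: cs) = cur :: pvSegs [] cs := by simp [pvSegs]
      rw [h3]
      simp [List.modifyHead]
    · by_cases hb : pvBnd c = true
      · have hcne : c ≠ '_' := fun he => by
          rw [he, pvBnd_underscore] at hb; exact Bool.false_ne_true hb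
        rw [if_pos hb]
        rw [show ((['_', c] ++ pvMarked cs : List Char)) = '_' :: c :: pvMarked cs from rfl]
        rw [pvSplit_noSep_append cur _ h]
        have h1 : pvSplit ('_' :: c :: pvMarked cs) = [] :: pvSplit (c :: pvMarked cs) := by
          simp [pvSplit]
        have h2 : c :: pvMarked cs = [c] ++ pvMarked cs := rfl
        have h3 : pvSplit ([c] ++ pvMarked cs) = pvSegs [c] cs :=
          ih [c] (by simp; exact fun he => hcne he.symm)
        rw [h1, h2, h3]
        have h4 : pvSegs cur (c :: cs) = cur :: pvSegs [c] cs := by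
          simp [pvSegs, hc, hb]
        rw [h4]
        simp [List.modifyHead]
      · rw [if_neg hb]
        rw [show (([c] ++ pvMarked cs : List Char)) = c :: pvMarked cs from rfl]
        have h1 : cur ++ c :: pvMarked cs = (cur ++ [c]) ++ pvMarked cs := by simp
        rw [h1, ih (cur ++ [c]) (by
          intro hmem
          rcases List.mem_append.mp hmem with h1 | h1
          · exact h h1
          · simp at h1; exact hc h1.symm)]
        have h2 : pvSegs cur (c :: cs) = pvSegs (cur ++ [c]) cs := by
          simp [pvSegs, hc, hb]
        rw [h2]

-- B's fused char loop computes the grouping fold over the segment list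
lemma pvScan_eq (cs : List Char) : ∀ (cur : List Char) (st : List (List Char) × Option (List Char)),
    (pvSegs cur cs).foldl pvGrp st
      = pvClose (cs.foldl pvStep (st, cur)).1.1 (cs.foldl pvStep (st, cur)).1.2
          (cs.foldl pvStep (st, cur)).2 := by
  induction cs with
  | nil => intro cur st; simp [pvSegs, pvGrp]
  | cons c cs ih =>
    intro cur st
    by_cases hc : c = '_'
    · subst hc
      have hseg : pvSegs cur ('_' :: cs) = cur :: pvSegs [] cs := by simp [pvSegs]
      have hstp : pvStep (st, cur) '_' = (pvGrp st cur, []) := by simp [pvStep, pvGrp]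
      rw [hseg, List.foldl_cons, List.foldl_cons, hstp]
      exact ih [] (pvGrp st cur)
    · by_cases hb : pvBnd c = true
      · have hseg : pvSegs cur (c :: cs) = cur :: pvSegs [c] cs := by simp [pvSegs, hc, hb]
        have hstp : pvStep (st, cur) c = (pvGrp st cur, [c]) := by
          simp [pvStep, pvGrp, hc, show (PySem.Chars.isupper c || PySem.Chars.isdigit c) = true from hb]
        rw [hseg, List.foldl_cons, List.foldl_cons, hstp]
        exact ih [c] (pvGrp st cur)
      · have hseg : pvSegs cur (c :: cs) = pvSegs (cur ++ [c]) cs := by simp [pvSegs, hc, hb]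
        have hstp : pvStep (st, cur) c = (st, cur ++ [c]) := by
          simp [pvStep, hc, show (PySem.Chars.isupper c || PySem.Chars.isdigit c) = false from (by simpa [pvBnd] using hb)]
        rw [hseg, List.foldl_cons, hstp]
        exact ih (cur ++ [c]) st

-- upper commutes with the grouping fold
def pvSU (st : List (List Char) × Option (List Char)) : List (List Char) × Option (List Char) :=
  (st.1.map (List.map PySem.Chars.upperChar), st.2.map (List.map PySem.Chars.upperChar))

lemma pvClose_upper (tokens : List (List Char)) (acr : Option (List Char)) (seg : List Char) :
    pvClose (tokens.map (List.map PySem.Chars.upperChar)) (acr.map (List.map PySem.Chars.upperChar))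
        (seg.map PySem.Chars.upperChar)
      = pvSU (pvClose tokens acr seg) := by
  unfold pvClose pvSU
  simp only [List.length_map]
  split
  · cases acr <;> simp
  · cases acr <;> simp

lemma pvFold_upper (segs : List (List Char)) :
    ∀ (st : List (List Char) × Option (List Char)),
    (segs.map (List.map PySem.Chars.upperChar)).foldl pvGrp (pvSU st)
      = pvSU (segs.foldl pvGrp st) := by
  induction segs with
  | nil => intro st; simp
  | cons seg segs ih =>
    intro st
    simp only [List.map_cons, List.foldl_cons]
    rw [show pvGrp (pvSU st) (seg.map PySem.Chars.upperChar)
          = pvSU (pvGrp st seg) from by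
        cases st with
        | mk a b => exact pvClose_upper a b seg]
    exact ih _

lemma pvFold_upper_nil (segs : List (List Char)) :
    (segs.map (List.map PySem.Chars.upperChar)).foldl pvGrp ([], none)
      = pvSU (segs.foldl pvGrp ([], none)) := pvFold_upper segs ([], none)

lemma pvFlush_upper (st : List (List Char) × Option (List Char)) :
    pvFlush (pvSU st) = (pvFlush st).map (List.map PySem.Chars.upperChar) := by
  cases st with
  | mk a b => cases b <;> simp [pvFlush, pvSU]

lemma pvJoin_upper (tokens : List (List Char)) :
    PySem.Chars.join ['_'] (tokens.map (List.map PySem.Chars.upperChar))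
      = (PySem.Chars.join ['_'] tokens).map PySem.Chars.upperChar := by
  induction tokens with
  | nil => simp [PySem.Chars.join_nil]
  | cons a l ih =>
    cases l with
    | nil => simp [PySem.Chars.join_singleton]
    | cons b l' =>
      simp only [List.map_cons] at ih ⊢
      rw [PySem.Chars.join_cons_cons, PySem.Chars.join_cons_cons, ih]
      have h1 : PySem.Chars.upperChar '_' = '_' := by decide
      simp [h1]

lemma pvDropWhile_head (cs : List Char) : ∀ (c : Char) (rest : List Char),
    cs.dropWhile (fun c => c == '_') = c :: rest → c ≠ '_' := by
  induction cs with
  | nil => intro c rest h; simp at h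
  | cons a cs ih =>
    intro c rest h
    rw [List.dropWhile_cons] at h
    by_cases ha : (a == '_') = true
    · rw [if_pos ha] at h
      exact ih c rest h
    · rw [if_neg ha] at h
      cases h
      simpa using ha

-- the two ports agree
lemma pv_main (s : String) : to_constant_case s = to_constant_case_alt s := by
  unfold to_constant_case to_constant_case_alt
  have hmark : ((s.toList.map (fun c =>
      if PySem.Chars.isupper c || PySem.Chars.isdigit c then ['_', c] else [c])).flatten)
      = pvMarked s.toList := rfl
  rw [hmark, pvDropWhile_marked s.toList]
  cases hdw : s.toList.dropWhile (fun c => c == '_') with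
  | nil => rfl
  | cons c0 rest =>
    simp only []
    have hc0 : c0 ≠ '_' := pvDropWhile_head _ _ _ hdw
    have hupper : PySem.Chars.upper (c0 :: pvMarked rest)
        = ([c0] ++ pvMarked rest).map PySem.Chars.upperChar := rfl
    rw [hupper, pvSplitOn_eq, pvSplit_upper,
        pvSplit_marked rest [c0] (by simp; exact fun h => hc0 h.symm)]
    have hstep : (fun (st : List (List Char) × Option (List Char)) (tok : List Char) =>
        if tok.length == 1 then
          (st.1, some ((st.2.getD []) ++ tok))
        else
          match st.2 with
          | some a => (st.1 ++ [a] ++ [tok], none)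
          | none   => (st.1 ++ [tok], none)) = pvGrp := by
      funext st tok
      cases st with
      | mk a b => cases b <;> rfl
    rw [hstep, pvFold_upper_nil, ← pvScan_eq rest [c0] ([], none)]
    show String.ofList (PySem.Chars.join ['_']
        (pvFlush (pvSU ((pvSegs [c0] rest).foldl pvGrp ([], none)))))
      = String.ofList (PySem.Chars.upper (PySem.Chars.join ['_']
        (pvFlush ((pvSegs [c0] rest).foldl pvGrp ([], none)))))
    rw [pvFlush_upper, pvJoin_upper]
    rfl

-- ===== VERDICT (by name: the statement is the Claim_ definition above) =====
theorem to_constant_case_spec : Claim_equal_to_constant_case := by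
  intro s _
  unfold Spec_to_constant_case
  exact pv_main s
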